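-- pv_equiv track=rewrite | github.com/hawnzug/smart | mmseg.py | largest_len
-- ===== SOURCE A (Python) =====
-- def len_list(list):
--     string=''
--     for i in list:
--         string+=i
--     return len(string)
--
-- def largest_len(list):
--     max=list[0]
--     result=[]
--     for i in list:
--         if len_list(i)>len_list(max):
--             max=i
--             result=[]
--         elif len_list(i)==len_list(max) and i!=max:
--             result.append(i)
--     result.append(max)
--     return result
-- ===== SOURCE B (Python) =====
-- def len_list(list):
--     string=''
--     for i in list:
--         string+=i
--     return len(string)
--
-- def largest_len(list):
--     # compute all lengths once, then use the built-ins: max picks the maximal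
--     # total length, index finds the first chunk achieving it (the winner),
--     # and one zip comprehension collects the ties; winner goes last.
--     lens = [len_list(c) for c in list]
--     maxlen = max(lens)
--     winner = list[lens.index(maxlen)]
--     result = [c for c, l in zip(list, lens) if l == maxlen and c != winner]
--     result.append(winner)
--     return result
-- ===== Notes on version B (the rewrite author's own statement) =====
-- stated objective: idiomatic
-- what changed: Replaces A's single pass that maintains and resets a tie list alongside a running max by a lengths table computed once plus the built-ins: max(lens) for the maximal length, lens.index for the first maximal chunk, and one zip comprehension for the ties.
-- outside the precondition, e.g. on largest_len([]): A raises IndexError, B raises ValueError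
import Mathlib
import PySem

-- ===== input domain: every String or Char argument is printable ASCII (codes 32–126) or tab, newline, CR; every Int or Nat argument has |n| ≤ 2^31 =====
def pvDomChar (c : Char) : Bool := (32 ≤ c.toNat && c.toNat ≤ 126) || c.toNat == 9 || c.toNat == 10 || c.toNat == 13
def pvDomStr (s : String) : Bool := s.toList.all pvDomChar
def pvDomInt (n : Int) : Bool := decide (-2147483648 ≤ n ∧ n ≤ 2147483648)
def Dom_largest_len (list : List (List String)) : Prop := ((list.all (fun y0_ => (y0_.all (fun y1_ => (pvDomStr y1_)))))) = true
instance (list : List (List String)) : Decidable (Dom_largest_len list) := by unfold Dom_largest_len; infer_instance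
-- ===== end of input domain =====

-- B computes the lengths table once and uses the built-ins (max, index, zip comprehension)
-- instead of A's single pass that maintains and resets a tie list; return value only, idiomatic.

-- ===== PORT A =====
-- helper len_list: builds the concatenated string and takes its len (shared by both Pythons)
def len_list (list : List String) : Int :=
  PySem.Str.len (list.foldl (fun string i => string ++ i) "")

def largest_len (list : List (List String)) : List (List String) :=
  match PySem.List.pyGet? list 0 with
  | none => []   -- unreachable under Pre_ (Python raises IndexError)
  | some m0 =>
    let st := list.foldl (fun (st : List String × List (List String)) i =>
      if len_list i > len_list st.1 then (i, [])
      else if (len_list i == len_list st.1 && i != st.1) then (st.1, st.2 ++ [i])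
      else st) (m0, [])
    st.2 ++ [st.1]

-- ===== PORT B =====
def largest_len_alt (list : List (List String)) : List (List String) :=
  let lens := list.map len_list
  match PySem.List.max? lens (fun y => y) with
  | none => []   -- unreachable under Pre_ (Python: max([]) raises ValueError)
  | some maxlen =>
    match PySem.List.index? lens maxlen with
    | none => []   -- unreachable (maxlen is an element of lens)
    | some k =>
      match PySem.List.pyGet? list (k : Int) with
      | none => []   -- unreachable (k is a valid index of lens = map of list)
      | some winner =>
        ((list.zip lens).filter (fun p => p.2 == maxlen && p.1 != winner)).map Prod.fst
          ++ [winner]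

-- ===== PRECONDITION & SPEC =====
-- On the empty list A raises IndexError (list[0]) and B raises ValueError (max([])).
def Pre_largest_len (list : List (List String)) : Prop := list ≠ []
instance (list : List (List String)) : Decidable (Pre_largest_len list) := by unfold Pre_largest_len; infer_instance
def pvWitness_largest_len : List (List String) := [["ab"], ["a", "b"], ["c"]]

def Spec_largest_len (list : List (List String)) (out : List (List String)) : Prop := out = largest_len_alt list
instance (list : List (List String)) (out : List (List String)) : Decidable (Spec_largest_len list out) := by unfold Spec_largest_len; infer_instance

-- ===== CLAIM (what is proved, stated in full; the proofs are below) =====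
def Claim_equal_largest_len : Prop := ∀ (list : List (List String)), Dom_largest_len list → Pre_largest_len list → Spec_largest_len list (largest_len list)

-- ===== LEMMAS AND PROOFS =====

-- the bare "running max" that A's pass computes implicitly
def pvFmax (m : List String) (l : List (List String)) : List String :=
  l.foldl (fun mx i => if len_list i > len_list mx then i else mx) m

theorem pvFmax_cons (m i : List String) (t : List (List String)) :
    pvFmax m (i :: t) = pvFmax (if len_list i > len_list m then i else m) t := rfl

-- the running max's length never decreases
theorem pvFmax_le (l : List (List String)) : ∀ m, len_list m ≤ len_list (pvFmax m l) := by
  induction l with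
  | nil => intro m; simp [pvFmax]
  | cons i t ih =>
    intro m
    rw [pvFmax_cons]
    by_cases h : len_list i > len_list m
    · simp only [if_pos h]; exact le_trans (le_of_lt h) (ih i)
    · simp only [if_neg h]; exact ih m

-- if the length did not strictly increase, the max is unchanged (updates are strictly increasing)
theorem pvFmax_eq_of_len_eq (l : List (List String)) :
    ∀ m, len_list (pvFmax m l) = len_list m → pvFmax m l = m := by
  induction l with
  | nil => intro m _; rfl
  | cons i t ih =>
    intro m h
    rw [pvFmax_cons] at h ⊢
    by_cases hgt : len_list i > len_list m
    · exfalso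
      rw [if_pos hgt] at h
      have := pvFmax_le t i
      omega
    · rw [if_neg hgt] at h ⊢
      exact ih m h

-- the running max is an element of the seeded list
theorem pvFmax_mem : ∀ (t : List (List String)) (m : List String), pvFmax m t ∈ m :: t := by
  intro t
  induction t with
  | nil => intro m; simp [pvFmax]
  | cons i t ih =>
    intro m
    rw [pvFmax_cons]
    by_cases h : len_list i > len_list m
    · rw [if_pos h]
      rcases List.mem_cons.mp (ih i) with h' | h'
      · simp [h']
      · simp [h']
    · rw [if_neg h]
      rcases List.mem_cons.mp (ih m) with h' | h'
      · simp [h']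
      · simp [h']

-- Python's max(lens) (= running max over the Int list) equals the length of A's running max
theorem pvFoldMax : ∀ (t : List (List String)) (m : List String),
    (t.map len_list).foldl max (len_list m) = len_list (pvFmax m t) := by
  intro t
  induction t with
  | nil => intro m; rfl
  | cons i t ih =>
    intro m
    rw [List.map_cons, List.foldl_cons, pvFmax_cons]
    by_cases h : len_list i > len_list m
    · rw [if_pos h, max_eq_right (le_of_lt h)]; exact ih i
    · rw [if_neg h, max_eq_left (not_lt.mp h)]; exact ih m

-- the element sitting at the first index of value v in (L.map f) is the first x with f x = v
theorem pvIndexGet {α : Type} (f : α → Int) (v : Int) :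
    ∀ (L : List α) (k : Nat), PySem.List.index? (L.map f) v = some k →
      L[k]? = L.find? (fun x => f x == v) := by
  intro L
  induction L with
  | nil => intro k hk; simp [PySem.List.index?] at hk
  | cons x L ih =>
    intro k hk
    by_cases hxv : f x = v
    · subst hxv
      rw [List.map_cons, PySem.List.index?_cons_self] at hk
      cases hk
      simp
    · rw [List.map_cons, PySem.List.index?_cons_of_ne (List.map f L) hxv] at hk
      rcases Option.map_eq_some_iff.mp hk with ⟨k', hk', rfl⟩
      rw [List.find?_cons_of_neg (by simpa using hxv), List.getElem?_cons_succ]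
      exact ih k' hk'

-- the first element whose length equals the running max's length IS the running max
theorem pvFind : ∀ (t : List (List String)) (m : List String),
    (m :: t).find? (fun x => len_list x == len_list (pvFmax m t)) = some (pvFmax m t) := by
  intro t
  induction t with
  | nil => intro m; simp [pvFmax]
  | cons i t ih =>
    intro m
    rw [pvFmax_cons]
    by_cases hgt : len_list i > len_list m
    · rw [if_pos hgt]
      have hm : ¬ (len_list m == len_list (pvFmax i t)) = true := by
        have := pvFmax_le t i
        simp only [beq_iff_eq]
        omega
      rw [List.find?_cons_of_neg (p := fun x => len_list x == len_list (pvFmax i t)) hm]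
      exact ih i
    · rw [if_neg hgt]
      have hle := pvFmax_le t m
      by_cases hm : len_list m = len_list (pvFmax m t)
      · have hp : (len_list m == len_list (pvFmax m t)) = true := by simpa using hm
        have := ih m
        rw [List.find?_cons_of_pos (p := fun x => len_list x == len_list (pvFmax m t)) hp] at this ⊢
        exact this
      · have hp : ¬ (len_list m == len_list (pvFmax m t)) = true := by simpa using hm
        have hi : ¬ (len_list i == len_list (pvFmax m t)) = true := by
          simp only [beq_iff_eq]
          omega
        rw [List.find?_cons_of_neg (p := fun x => len_list x == len_list (pvFmax m t)) hp, List.find?_cons_of_neg (p := fun x => len_list x == len_list (pvFmax m t)) hi]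
        have := ih m
        rw [List.find?_cons_of_neg (p := fun x => len_list x == len_list (pvFmax m t)) hp] at this
        exact this

-- filtering the zipped (chunk, length) pairs and projecting equals filtering the chunks directly
theorem pvZipFilter {α : Type} [BEq α] (f : α → Int) (v : Int) (w : α) :
    ∀ (L : List α),
      ((L.zip (L.map f)).filter (fun p => p.2 == v && p.1 != w)).map Prod.fst
        = L.filter (fun c => f c == v && c != w) := by
  intro L
  induction L with
  | nil => rfl
  | cons x L ih =>
    rw [List.map_cons, List.zip_cons_cons]
    by_cases hp : (f x == v && x != w) = true
    · rw [List.filter_cons_of_pos (by simpa using hp), List.filter_cons_of_pos (p := fun c => f c == v && c != w) hp, List.map_cons, ih]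
    · rw [List.filter_cons_of_neg (by simpa using hp), List.filter_cons_of_neg (p := fun c => f c == v && c != w) hp, ih]

-- the key invariant: A's single pass equals (running max, ties-so-far), where the tie list is the
-- filter of the whole segment by the FINAL max whenever no further reset happens, else it restarts
theorem pvFoldA (l : List (List String)) : ∀ (mx : List String) (res : List (List String)),
    l.foldl (fun (st : List String × List (List String)) i =>
      if len_list i > len_list st.1 then (i, [])
      else if (len_list i == len_list st.1 && i != st.1) then (st.1, st.2 ++ [i])
      else st) (mx, res)
    = (pvFmax mx l,
       (if len_list (pvFmax mx l) = len_list mx then res else []) ++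
         l.filter (fun i => len_list i == len_list (pvFmax mx l) && i != pvFmax mx l)) := by
  induction l with
  | nil => intro mx res; simp [pvFmax]
  | cons i t ih =>
    intro mx res
    rw [List.foldl_cons, pvFmax_cons]
    by_cases h1 : len_list i > len_list mx
    · simp only [if_pos h1]
      rw [ih i []]
      have hlt : ¬ len_list (pvFmax i t) = len_list mx := by
        have := pvFmax_le t i; omega
      have hp : (len_list i == len_list (pvFmax i t) && i != pvFmax i t) = false := by
        by_cases he : len_list (pvFmax i t) = len_list i
        · have : pvFmax i t = i := pvFmax_eq_of_len_eq t i he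
          simp [this]
        · simp only [bne]
          have : (len_list i == len_list (pvFmax i t)) = false := by
            simp only [beq_eq_false_iff_ne]; omega
          simp [this]
      simp [hlt, hp]
    · simp only [if_neg h1]
      by_cases h2 : (len_list i == len_list mx && i != mx) = true
      · simp only [if_pos h2]
        rw [ih mx (res ++ [i])]
        obtain ⟨he, hne⟩ := Bool.and_eq_true_iff.mp h2
        have he' : len_list i = len_list mx := by exact_mod_cast beq_iff_eq.mp he
        by_cases hfix : len_list (pvFmax mx t) = len_list mx
        · have hmx : pvFmax mx t = mx := pvFmax_eq_of_len_eq t mx hfix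
          simp [hmx, h2]
        · have hp : (len_list i == len_list (pvFmax mx t) && i != pvFmax mx t) = false := by
            have : (len_list i == len_list (pvFmax mx t)) = false := by
              simp only [beq_eq_false_iff_ne]; omega
            simp [this]
          simp [hfix, hp]
      · simp only [if_neg h2]
        rw [ih mx res]
        have hp : (len_list i == len_list (pvFmax mx t) && i != pvFmax mx t) = false := by
          by_cases he : len_list i = len_list mx
          · have hi : i = mx := by
              by_contra hne
              exact h2 (by simp [he, bne, hne])
            subst hi
            by_cases hfix : len_list (pvFmax i t) = len_list i
            · have := pvFmax_eq_of_len_eq t i hfix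
              simp [this]
            · have : (len_list i == len_list (pvFmax i t)) = false := by
                simp only [beq_eq_false_iff_ne]; omega
              simp [this]
          · have hlt : len_list i < len_list mx := by omega
            have := pvFmax_le t mx
            have : (len_list i == len_list (pvFmax mx t)) = false := by
              simp only [beq_eq_false_iff_ne]; omega
            simp [this]
        simp [hp]

-- ===== VERDICT (by name: the statement is the Claim_ definition above) =====
theorem largest_len_spec : Claim_equal_largest_len := by
  intro list _ hpre
  unfold Spec_largest_len
  match list, hpre with
  | h :: t, _ =>
    -- A's side reduces to ties-filter ++ [running max]
    have hA : largest_len (h :: t)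
        = (h :: t).filter
            (fun i => len_list i == len_list (pvFmax h t) && i != pvFmax h t)
          ++ [pvFmax h t] := by
      unfold largest_len
      rw [PySem.List.pyGet?_zero_cons]
      simp only [pvFoldA (h :: t) h []]
      have : pvFmax h (h :: t) = pvFmax h t := by
        rw [pvFmax_cons]; simp
      simp [this]
    -- B's side: max, first index, lookup all name the same running max
    have hmax : PySem.List.max? ((h :: t).map len_list) (fun y => y)
        = some (len_list (pvFmax h t)) := by
      rw [List.map_cons, PySem.List.max?_id_cons, pvFoldMax]
    have hmem : len_list (pvFmax h t) ∈ (h :: t).map len_list :=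
      List.mem_map_of_mem (pvFmax_mem t h)
    have hsome : (PySem.List.index? ((h :: t).map len_list) (len_list (pvFmax h t))).isSome :=
      (PySem.List.index?_isSome_iff _ _).mpr hmem
    obtain ⟨k, hk⟩ := Option.isSome_iff_exists.mp hsome
    have hget : (h :: t)[k]? = some (pvFmax h t) := by
      rw [pvIndexGet len_list (len_list (pvFmax h t)) (h :: t) k hk, pvFind]
    unfold largest_len_alt
    simp only [hmax, hk, PySem.List.pyGet?_natCast, hget]
    rw [pvZipFilter len_list (len_list (pvFmax h t)) (pvFmax h t) (h :: t), hA]
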